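-- pv_equiv track=rewrite | github.com/pypi-data/pypi-mirror-124 | packages/daves-dev-tools/daves-dev-tools-0.20.0.tar.gz/daves-dev-tools-0.20.0/daves_dev_tools/distribute.py | _argv_get_last_index
-- ===== SOURCE A (Python) =====
-- from typing import (
--     Any,
--     Callable,
--     Dict,
--     FrozenSet,
--     Iterable,
--     List,
--     Optional,
--     Set,
--     Tuple,
--     Union,
-- )
--
-- def _negative_enumerate_index(item: Tuple[int, Any]) -> Tuple[int, Any]:
--     return -item[0], item[1]
--
-- def _argv_get_last_index(
--     argv: List[str], keys: Optional[Set[str]] = None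
-- ) -> Optional[int]:
--     """
--     Return the index of the last item in `argv` which matches one of the
--     indicated keys, or `None`, if not found. If no keys are provided,
--     find the index of the last positional argument.
--     """
--     if isinstance(keys, str):
--         keys = {keys}
--     index: int
--     for index, value in map(
--         _negative_enumerate_index, enumerate(reversed(argv), 1)  # type: ignore
--     ):
--         if keys is not None:
--             if value in keys:
--                 return index
--         elif not value.startswith("-"):
--             try:
--                 if not argv[index - 1].startswith("-"):
--                     return -index
--             except IndexError:
--                 pass
--     return None
-- ===== SOURCE B (Python) =====
-- from typing import List, Optional, Set, Union
--
--
-- def _argv_get_last_index(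
--     argv: List[str], keys: Optional[Set[str]] = None
-- ) -> Optional[int]:
--     """
--     Return the index of the last item in `argv` which matches one of the
--     indicated keys, or `None`, if not found. If no keys are provided,
--     find the index of the last positional argument.
--     """
--     if isinstance(keys, str):
--         keys = {keys}
--     n = len(argv)
--     result: Optional[int] = None
--     for i in range(n):
--         if keys is not None:
--             if argv[i] in keys:
--                 result = i - n
--         elif (
--             i >= 1
--             and not argv[i].startswith("-")
--             and not argv[i - 1].startswith("-")
--         ):
--             result = n - i
--     return result
-- ===== Notes on version B (the rewrite author's own statement) =====
-- stated objective: simpler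
-- what changed: Replaced the backward scan over map(_negative_enumerate_index, enumerate(reversed(argv), 1)) with negated indices and an early return (plus a try/except for the first element) by a plain forward loop over range(len(argv)) that keeps the last matching result, with the first-element case handled by an explicit i >= 1 test.
import Mathlib
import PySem

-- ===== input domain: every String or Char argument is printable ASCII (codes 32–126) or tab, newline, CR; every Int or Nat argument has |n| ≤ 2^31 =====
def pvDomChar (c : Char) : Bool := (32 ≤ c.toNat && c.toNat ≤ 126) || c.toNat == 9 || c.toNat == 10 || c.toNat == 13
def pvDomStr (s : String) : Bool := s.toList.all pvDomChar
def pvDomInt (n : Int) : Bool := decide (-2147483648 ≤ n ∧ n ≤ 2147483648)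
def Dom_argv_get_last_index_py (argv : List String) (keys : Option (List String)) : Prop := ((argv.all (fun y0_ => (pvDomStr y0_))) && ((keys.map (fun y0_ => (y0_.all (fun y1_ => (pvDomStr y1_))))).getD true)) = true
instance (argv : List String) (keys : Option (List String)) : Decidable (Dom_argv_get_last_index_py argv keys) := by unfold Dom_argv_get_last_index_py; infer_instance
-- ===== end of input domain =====

-- B replaces A's backward scan with early return by a single forward pass that keeps
-- the last matching index (objective: simpler decomposition; same O(n) cost).

-- ===== PORT A =====
-- A's for-loop over map(_negative_enumerate_index, enumerate(reversed(argv), 1)):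
-- each pair is (index, value) with index the negated 1-based position from the end.
def pvALoop (argv : List String) (keys : Option (List String)) : List (Int × String) → Option Int
  | [] => none                                   -- loop exhausted: return None
  | (index, value) :: rest =>
    match keys with
    | some ks =>
      if value ∈ ks then some index else pvALoop argv keys rest
    | none =>
      if ¬ PySem.Str.startswith value "-" then
        match PySem.List.pyGet? argv (index - 1) with   -- argv[index-1]; none = IndexError, which A passes
        | some prev =>
          if ¬ PySem.Str.startswith prev "-" then some (-index)
          else pvALoop argv keys rest
        | none => pvALoop argv keys rest
      else pvALoop argv keys rest

def argv_get_last_index_py (argv : List String) (keys : Option (List String)) : Option Int :=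
  pvALoop argv keys ((PySem.List.enumerate argv.reverse 1).map (fun p => (-p.1, p.2)))

-- ===== PORT B =====
-- B: one forward pass over range(len(argv)) keeping the last matching result.
def argv_get_last_index_py_alt (argv : List String) (keys : Option (List String)) : Option Int :=
  (PySem.List.pyRange 0 (argv.length : Int) 1).foldl
    (fun result i =>
      match keys with
      | some ks =>
        if PySem.List.pyGetD argv i "" ∈ ks then some (i - (argv.length : Int)) else result
      | none =>
        if 1 ≤ i ∧ ¬ PySem.Str.startswith (PySem.List.pyGetD argv i "") "-"
            ∧ ¬ PySem.Str.startswith (PySem.List.pyGetD argv (i - 1) "") "-"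
        then some ((argv.length : Int) - i) else result)
    none

-- ===== PRECONDITION & SPEC =====
def Spec_argv_get_last_index_py (argv : List String) (keys : Option (List String)) (out : Option Int) : Prop := out = argv_get_last_index_py_alt argv keys
instance (argv : List String) (keys : Option (List String)) (out : Option Int) : Decidable (Spec_argv_get_last_index_py argv keys out) := by unfold Spec_argv_get_last_index_py; infer_instance

-- ===== CLAIM (what is proved, stated in full; the proofs are below) =====
def Claim_equal_argv_get_last_index_py : Prop := ∀ (argv : List String) (keys : Option (List String)), Dom_argv_get_last_index_py argv keys → Spec_argv_get_last_index_py argv keys (argv_get_last_index_py argv keys)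

-- ===== LEMMAS AND PROOFS =====

-- The per-index "hit" value both programs agree on: some result if forward index k matches.
def pvHit (argv : List String) (keys : Option (List String)) (k : Nat) : Option Int :=
  match keys with
  | some ks => if argv.getD k "" ∈ ks then some ((k : Int) - argv.length) else none
  | none =>
    if 1 ≤ k ∧ ¬ PySem.Str.startswith (argv.getD k "") "-"
        ∧ ¬ PySem.Str.startswith (argv.getD (k - 1) "") "-"
    then some ((argv.length : Int) - k) else none

-- "keep the last hit" fold = first hit of the reversed order
theorem pv_foldl_or_findSome {α : Type} (h : α → Option Int) : ∀ (l : List α) (a : Option Int),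
    l.foldl (fun acc x => (h x).or acc) a = (l.reverse.findSome? h).or a := by
  intro l
  induction l with
  | nil => simp
  | cons x l ih =>
    intro a
    simp only [List.foldl_cons, ih, List.reverse_cons, List.findSome?_append]
    cases hx : h x <;> cases hl : l.reverse.findSome? h <;> simp [List.findSome?, hx, Option.or]

-- A's pair list, re-indexed by forward position
theorem pv_pairs_eq (argv : List String) :
    (PySem.List.enumerate argv.reverse 1).map (fun p => (-p.1, p.2))
      = ((List.range argv.length).reverse).map
          (fun (k : Nat) => ((k : Int) - argv.length, argv.getD k "")) := by
  apply List.ext_getElem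
  · simp [PySem.List.length_enumerate]
  · intro j h1 h2
    have hj : j < argv.length := by simpa [PySem.List.length_enumerate] using h1
    simp only [List.getElem_map, PySem.List.getElem_enumerate, List.getElem_reverse,
      List.getElem_range, List.length_range]
    rw [Prod.mk.injEq]
    constructor
    · omega
    · rw [List.getD_eq_getElem?_getD, List.getElem?_eq_getElem (by omega)]
      simp

theorem pv_pyGet_pred (argv : List String) (k : Nat) (hk : k < argv.length) :
    PySem.List.pyGet? argv ((k : Int) - argv.length - 1)
      = if 1 ≤ k then some (argv.getD (k - 1) "") else none := by
  simp only [PySem.List.pyGet?, PySem.List.pyIdx?]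
  split_ifs with h1 h2 h3 h4 h5 <;> try omega
  · have he : argv.length - (-((k : Int) - argv.length - 1)).toNat = k - 1 := by omega
    rw [he, List.getD_eq_getElem?_getD, List.getElem?_eq_getElem (by omega)]
    simp [List.getElem?_eq_getElem (show k - 1 < argv.length by omega)]
  · rfl


theorem pv_aloop_eq (argv : List String) (keys : Option (List String)) :
    ∀ (l : List Nat), (∀ k ∈ l, k < argv.length) →
    pvALoop argv keys (l.map (fun (k : Nat) => ((k : Int) - argv.length, argv.getD k "")))
      = l.findSome? (pvHit argv keys) := by
  intro l
  induction l with
  | nil => intro _; rfl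
  | cons k l ih =>
    intro h
    have hk : k < argv.length := h k (List.mem_cons_self)
    have ih' := ih (fun j hj => h j (List.mem_cons_of_mem _ hj))
    have hg := pv_pyGet_pred argv k hk
    simp only [List.map_cons, List.findSome?, pvALoop, pvHit,
      List.getD_eq_getElem?_getD, PySem.Str.startswith_eq, Bool.not_eq_true] at ih' hg ⊢
    match keys with
    | some ks =>
      by_cases hmem : argv[k]?.getD "" ∈ ks
      · simp [hmem]
      · simp [hmem, ih']
    | none =>
      rw [hg]
      by_cases h1 : 1 ≤ k
      · by_cases hsv : PySem.Chars.startswith (argv[k]?.getD "").toList ['-'] = false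
        · by_cases hsp : PySem.Chars.startswith (argv[k - 1]?.getD "").toList ['-'] = false
          · have hne : -((k : Int) - argv.length) = (argv.length : Int) - k := by ring
            simp [h1, hsv, hsp, hne]
          · simp [h1, hsv, hsp, ih']
        · simp [h1, hsv, ih']
      · simp [h1, ih']

theorem pv_step_eq (argv : List String) (keys : Option (List String)) (k : Nat)
    (acc : Option Int) :
    (match keys with
      | some ks => if PySem.List.pyGetD argv (k : Int) "" ∈ ks then some ((k : Int) - (argv.length : Int)) else acc
      | none => if 1 ≤ (k : Int) ∧ ¬ PySem.Str.startswith (PySem.List.pyGetD argv (k : Int) "") "-"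
            ∧ ¬ PySem.Str.startswith (PySem.List.pyGetD argv ((k : Int) - 1) "") "-"
        then some ((argv.length : Int) - (k : Int)) else acc)
     = (pvHit argv keys k).or acc := by
  match keys with
  | some ks =>
    rw [PySem.List.pyGetD_natCast]
    simp only [pvHit]
    split_ifs <;> simp [Option.or]
  | none =>
    simp only [pvHit]
    by_cases h1 : 1 ≤ k
    · have hc : ((k : Int) - 1) = ((k - 1 : Nat) : Int) := by omega
      have h1' : (1 : Int) ≤ (k : Int) := by exact_mod_cast h1
      rw [hc, PySem.List.pyGetD_natCast, PySem.List.pyGetD_natCast]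
      split_ifs with ha hb hb
      · simp [Option.or]
      · exact absurd ⟨h1, ha.2.1, ha.2.2⟩ hb
      · exact absurd ⟨h1', hb.2.1, hb.2.2⟩ ha
      · simp [Option.or]
    · have h1' : ¬ (1 : Int) ≤ (k : Int) := by exact_mod_cast h1
      simp [h1, h1', Option.or]

theorem pv_B_eq (argv : List String) (keys : Option (List String)) :
    argv_get_last_index_py_alt argv keys
      = ((List.range argv.length).reverse).findSome? (pvHit argv keys) := by
  unfold argv_get_last_index_py_alt
  rw [PySem.List.pyRange_zero_nat, List.foldl_map]
  refine (List.foldl_ext _ (fun acc k => (pvHit argv keys k).or acc) none ?_).trans ?_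
  · intro acc k _
    have h := pv_step_eq argv keys k acc
    cases keys <;> exact h
  · rw [pv_foldl_or_findSome]
    simp

theorem pv_A_eq (argv : List String) (keys : Option (List String)) :
    argv_get_last_index_py argv keys
      = ((List.range argv.length).reverse).findSome? (pvHit argv keys) := by
  unfold argv_get_last_index_py
  rw [pv_pairs_eq]
  exact pv_aloop_eq argv keys _ (by simp)

-- ===== VERDICT (by name: the statement is the Claim_ definition above) =====
theorem argv_get_last_index_py_spec : Claim_equal_argv_get_last_index_py := by
  intro argv keys _
  unfold Spec_argv_get_last_index_py
  rw [pv_A_eq, pv_B_eq]
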